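-- pv_equiv track=rewrite | github.com/vsdudakov/django-rest-async | src/django_rest_async/rest/helpers.py | pydantic_errors_to_rest_errors
-- ===== SOURCE A (Python) =====
-- def pydantic_errors_to_rest_errors(pydantic_errors: dict) -> dict:
--     rest_errors = {}
--     for error in pydantic_errors:
--         fields = error.get("loc") or []
--         message = error.get("msg")
--         for field in fields:
--             if field not in rest_errors:
--                 rest_errors[field] = []
--             rest_errors[field].append(message)
--
--     return rest_errors
-- ===== SOURCE B (Python) =====
-- def pydantic_errors_to_rest_errors(pydantic_errors: dict) -> dict:
--     pairs = [(field, error.get("msg"))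
--              for error in pydantic_errors
--              for field in (error.get("loc") or [])]
--     order = list(dict.fromkeys(field for field, _ in pairs))
--     return {field: [msg for f, msg in pairs if f == field] for field in order}
-- ===== Notes on version B (the rewrite author's own statement) =====
-- stated objective: alternative
-- what changed: Replaces A's single-pass dict accumulation (ensure-key-then-append per field) with a flatten-into-(field,msg)-pairs, dedup-first-occurrence-keys, then per-key filter pipeline.
-- outside the precondition, e.g. on pydantic_errors_to_rest_errors([{'loc': 'a'}]): A returns {'a': [None]}, B returns {'a': [None]}
import Mathlib
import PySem

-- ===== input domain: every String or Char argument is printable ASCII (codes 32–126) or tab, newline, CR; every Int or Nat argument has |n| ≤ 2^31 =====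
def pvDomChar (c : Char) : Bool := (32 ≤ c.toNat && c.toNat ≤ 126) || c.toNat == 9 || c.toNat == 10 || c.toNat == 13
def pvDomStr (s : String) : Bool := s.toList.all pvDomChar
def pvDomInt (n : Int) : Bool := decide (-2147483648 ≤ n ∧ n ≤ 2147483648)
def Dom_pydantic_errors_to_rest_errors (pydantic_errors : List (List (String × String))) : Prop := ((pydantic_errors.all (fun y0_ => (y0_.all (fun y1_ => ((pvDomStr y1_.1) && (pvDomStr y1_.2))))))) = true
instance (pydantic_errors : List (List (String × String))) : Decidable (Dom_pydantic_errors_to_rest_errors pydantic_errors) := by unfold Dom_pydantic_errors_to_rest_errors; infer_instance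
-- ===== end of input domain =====

-- B replaces A's one-pass dict accumulation by a flatten → dedup-keys → per-key filter pipeline
-- (objective: alternative decomposition, same observable result; not faster).
-- Values are dict[str, str]; 'for field in fields' iterates the characters of the "loc" string.

-- ===== PORT A =====
-- fields = error.get("loc") or []   (empty/missing string is falsy → [])
def pvFieldsA (error : List (String × String)) : List Char :=
  match (PySem.Dict.mk error).get? "loc" with
  | some s => if s.toList = [] then [] else s.toList
  | none => []

-- if field not in rest_errors: rest_errors[field] = [] ; rest_errors[field].append(message)
def pvStepA (message : String) (d : PySem.Dict String (List String)) (field : String) :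
    PySem.Dict String (List String) :=
  let d1 := if d.contains field then d else d.insert field []
  d1.modify field [] (fun l => l ++ [message])

def pydantic_errors_to_rest_errors (pydantic_errors : List (List (String × String))) : List (String × List String) :=
  (pydantic_errors.foldl
    (fun d error =>
      let fields := pvFieldsA error
      -- message = error.get("msg"); Pre_ guarantees it is present whenever fields ≠ []
      let message := ((PySem.Dict.mk error).get? "msg").getD ""
      fields.foldl (fun d c => pvStepA message d (String.singleton c)) d)
    PySem.Dict.empty).items

-- ===== PORT B =====
-- pairs contributed by one error: one (field, msg) per character of the "loc" string
def pvPairsOf (error : List (String × String)) : List (String × String) :=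
  (match (PySem.Dict.mk error).get? "loc" with
   | some s => s.toList
   | none => []).map
    (fun c => (String.singleton c, ((PySem.Dict.mk error).get? "msg").getD ""))

def pydantic_errors_to_rest_errors_alt (pydantic_errors : List (List (String × String))) : List (String × List String) :=
  let pairs := pydantic_errors.flatMap pvPairsOf
  let order := PySem.List.dedup (pairs.map (·.1))
  order.map (fun f => (f, (pairs.filter (fun p => p.1 == f)).map (·.2)))

-- ===== PRECONDITION & SPEC =====
-- Pre_ excludes errors whose "loc" string is nonempty while "msg" is missing: there A puts
-- Python None into the message lists, which is not a value of the declared type List String.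
def Pre_pydantic_errors_to_rest_errors (pydantic_errors : List (List (String × String))) : Prop :=
  (pydantic_errors.all (fun error =>
    pvFieldsA error = [] || ((PySem.Dict.mk error).get? "msg").isSome)) = true
instance (pydantic_errors : List (List (String × String))) : Decidable (Pre_pydantic_errors_to_rest_errors pydantic_errors) := by unfold Pre_pydantic_errors_to_rest_errors; infer_instance

def pvWitness_pydantic_errors_to_rest_errors : (List (List (String × String))) :=
  [[("loc", "ab"), ("msg", "bad value")], [("loc", "b"), ("msg", "missing")], [("x", "y")]]

def Spec_pydantic_errors_to_rest_errors (pydantic_errors : List (List (String × String))) (out : List (String × List String)) : Prop := out = pydantic_errors_to_rest_errors_alt pydantic_errors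
instance (pydantic_errors : List (List (String × String))) (out : List (String × List String)) : Decidable (Spec_pydantic_errors_to_rest_errors pydantic_errors out) := by unfold Spec_pydantic_errors_to_rest_errors; infer_instance

-- ===== CLAIM (what is proved, stated in full; the proofs are below) =====
def Claim_equal_pydantic_errors_to_rest_errors : Prop := ∀ (pydantic_errors : List (List (String × String))), Dom_pydantic_errors_to_rest_errors pydantic_errors → Pre_pydantic_errors_to_rest_errors pydantic_errors → Spec_pydantic_errors_to_rest_errors pydantic_errors (pydantic_errors_to_rest_errors pydantic_errors)

-- ===== LEMMAS AND PROOFS =====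

-- A's per-field step is exactly one 'modify' (ensure-key-then-append = append-to-default).
theorem pvStepA_eq_modify (m : String) (d : PySem.Dict String (List String)) (f : String) :
    pvStepA m d f = d.modify f [] (fun l => l ++ [m]) := by
  unfold pvStepA
  by_cases h : d.contains f = true
  · simp [h]
  · simp only [h]
    simp [PySem.Dict.modify, PySem.Dict.getD_insert_self, PySem.Dict.insert_insert_self,
      PySem.Dict.getD_of_not_contains d ([] : List String) (by simpa using h)]

-- folding a function over a flatMap = the nested double fold
theorem foldl_flatMap {α β γ : Type} (l : List α) (h : α → List β) (g : γ → β → γ) (d : γ) :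
    (l.flatMap h).foldl g d = l.foldl (fun d e => (h e).foldl g d) d := by
  induction l generalizing d with
  | nil => rfl
  | cons x xs ih => simp [List.flatMap_cons, List.foldl_append, ih]

theorem pydantic_errors_to_rest_errors_spec : Claim_equal_pydantic_errors_to_rest_errors := by
  intro pydantic_errors _ _
  unfold Spec_pydantic_errors_to_rest_errors
  unfold pydantic_errors_to_rest_errors pydantic_errors_to_rest_errors_alt
  -- rewrite A's nested loop into one fold of 'modify' over the flat pair list
  have hA :
      (pydantic_errors.foldl
        (fun d error =>
          (pvFieldsA error).foldl
            (fun d c => pvStepA (((PySem.Dict.mk error).get? "msg").getD "") d (String.singleton c)) d)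
        PySem.Dict.empty)
      = ((pydantic_errors.flatMap pvPairsOf).foldl
          (fun d p => d.modify p.1 [] (fun l => l ++ [p.2])) PySem.Dict.empty) := by
    rw [foldl_flatMap]
    apply PySem.List.foldl_congr_mem
    intro d error _
    unfold pvPairsOf
    rw [List.foldl_map]
    have hfields :
        (match (PySem.Dict.mk error).get? "loc" with
          | some s => s.toList
          | none => []) = pvFieldsA error := by
      unfold pvFieldsA
      cases h : (PySem.Dict.mk error).get? "loc" with
      | none => rfl
      | some s => by_cases hs : s.toList = [] <;> simp [hs]
    rw [hfields]
    apply PySem.List.foldl_congr_mem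
    intro d c _
    exact pvStepA_eq_modify _ _ _
  simp only [hA]
  set ps := pydantic_errors.flatMap pvPairsOf with hps
  -- items of the grouped dict, key by key
  have hnd : ((ps.foldl (fun d p => d.modify p.1 [] (fun l => l ++ [p.2])) PySem.Dict.empty)).keys.Nodup := by
    exact PySem.Dict.nodup_keys_foldl_modify_key ps Prod.fst [] (fun _ p => (fun l => l ++ [p.2])) _
      (by simp [PySem.Dict.keys_empty])
  rw [PySem.Dict.items_eq_map_keys _ hnd []]
  have hkeys : ((ps.foldl (fun d p => d.modify p.1 [] (fun l => l ++ [p.2])) PySem.Dict.empty)).keys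
      = PySem.List.dedup (ps.map (·.1)) := by
    rw [PySem.Dict.keys_foldl_modify_key ps Prod.fst [] (fun _ p => (fun l => l ++ [p.2]))]
    simp [PySem.Dict.keys_empty, PySem.Set.update, PySem.List.dedup, PySem.Set.ofList,
      PySem.Set.empty]
  rw [hkeys]
  apply List.map_congr_left
  intro f _
  have := PySem.Dict.getD_foldl_modify_append ps PySem.Dict.empty f
  simp only [PySem.Dict.getD_empty, List.nil_append] at this
  simp [this]
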